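-- pv_equiv track=rewrite | github.com/woong02022/sheet_to_midi | shape.py | left_same_right_up_left_down
-- ===== SOURCE A (Python) =====
-- def left_same_right_up_left_down(made_finger, current_len):
--     """
--         모두 처리후 오른손 기준으로 제작이 됬으므로 왼손이라면 반전을 시킨다.
--         """
--
--     # 현재 노트의 차이를 계산한다.
--
--     # end finger 를 정하는 과정,
--     # 이때 end finger 는 현재 노트가 2개일때만 사용된다.
--
--     # 개수가 1인 경우는 3, 4, 5의 배수를 돌리고 나머지가 1인 경우 밖에 없음
--     if current_len == 1:
--         made_finger += [3]
--
--     elif current_len == 2: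
--         made_finger += [3, 4]
--
--     # 길이가 3 혹은 3의 배수
--     elif current_len >= 3:
--         num_re = current_len // 3
--         remain = current_len % 3
--         for i in range(0, num_re):
--             made_finger += [2, 3, 4]
--
--         made_finger = left_same_right_up_left_down(made_finger, remain)
--
--         # 3, 4, 5 의 배수 x, 7 이상의 노트들
--         # 무한 루프해서 4개 핑거(1234) 로 채운다음 나머지로 마무리
--
--     return made_finger
-- ===== SOURCE B (Python) =====
-- def left_same_right_up_left_down(made_finger, current_len):
--     q, r = divmod(current_len, 3)
--     if current_len >= 3:
--         made_finger += [2, 3, 4] * q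
--         current_len = r
--     if current_len == 1:
--         made_finger += [3]
--     elif current_len == 2:
--         made_finger += [3, 4]
--     return made_finger
-- ===== Notes on version B (the rewrite author's own statement) =====
-- stated objective: simpler
-- what changed: B removes the self-recursive call and the append loop: it computes divmod(current_len, 3) once, appends [2,3,4]*q by list multiplication, and handles the remainder with an inline if/elif instead of recursing.
import Mathlib
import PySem

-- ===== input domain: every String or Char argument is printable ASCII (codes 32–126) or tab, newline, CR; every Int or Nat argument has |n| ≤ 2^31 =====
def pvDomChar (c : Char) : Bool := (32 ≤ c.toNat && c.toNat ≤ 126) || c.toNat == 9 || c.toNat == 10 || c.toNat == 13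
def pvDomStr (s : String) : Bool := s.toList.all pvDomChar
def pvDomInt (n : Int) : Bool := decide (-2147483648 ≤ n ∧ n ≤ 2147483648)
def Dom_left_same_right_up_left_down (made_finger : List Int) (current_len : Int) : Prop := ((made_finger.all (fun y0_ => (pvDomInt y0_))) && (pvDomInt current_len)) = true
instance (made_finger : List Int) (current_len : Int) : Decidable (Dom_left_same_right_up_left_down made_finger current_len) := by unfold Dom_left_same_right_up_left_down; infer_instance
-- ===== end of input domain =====

-- B removes the recursion and the append loop, using divmod once and list multiplication; objective: simpler.
-- A mutates made_finger in place via +=; B performs the same mutation. The equivalence proved is about the return value.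

-- ===== PORT A =====
def left_same_right_up_left_down (made_finger : List Int) (current_len : Int) : List Int :=
  if current_len = 1 then made_finger ++ [3]
  else if current_len = 2 then made_finger ++ [3, 4]
  else if 3 ≤ current_len then
    let num_re := PySem.Int.floordiv current_len 3
    let remain := PySem.Int.mod current_len 3
    let mf := (PySem.List.pyRange 0 num_re 1).foldl (fun acc _ => acc ++ [2, 3, 4]) made_finger
    left_same_right_up_left_down mf remain
  else made_finger
termination_by current_len.toNat
decreasing_by
  have h : PySem.Int.mod current_len 3 = current_len % 3 :=
    PySem.Int.mod_eq_emod_of_pos (by omega)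
  have h1 : 0 ≤ current_len % 3 := Int.emod_nonneg _ (by omega)
  have h2 : current_len % 3 < 3 := Int.emod_lt_of_pos _ (by omega)
  omega

-- ===== PORT B =====
def left_same_right_up_left_down_alt (made_finger : List Int) (current_len : Int) : List Int :=
  let q := PySem.Int.floordiv current_len 3
  let r := PySem.Int.mod current_len 3
  let p : List Int × Int :=
    if 3 ≤ current_len then
      (made_finger ++ (List.replicate q.toNat ([2, 3, 4] : List Int)).flatten, r)
    else (made_finger, current_len)
  if p.2 = 1 then p.1 ++ [3]
  else if p.2 = 2 then p.1 ++ [3, 4]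
  else p.1

-- ===== PRECONDITION & SPEC =====
def Spec_left_same_right_up_left_down (made_finger : List Int) (current_len : Int) (out : List Int) : Prop := out = left_same_right_up_left_down_alt made_finger current_len
instance (made_finger : List Int) (current_len : Int) (out : List Int) : Decidable (Spec_left_same_right_up_left_down made_finger current_len out) := by unfold Spec_left_same_right_up_left_down; infer_instance

-- ===== CLAIM (what is proved, stated in full; the proofs are below) =====
def Claim_equal_left_same_right_up_left_down : Prop := ∀ (made_finger : List Int) (current_len : Int), Dom_left_same_right_up_left_down made_finger current_len → Spec_left_same_right_up_left_down made_finger current_len (left_same_right_up_left_down made_finger current_len)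

-- ===== LEMMAS AND PROOFS =====

-- the append loop of A equals appending the flattened replicate of B
theorem foldl_append_const_replicate (l : List Int) (mf b : List Int) :
    l.foldl (fun acc _ => acc ++ b) mf = mf ++ (List.replicate l.length b).flatten := by
  induction l generalizing mf with
  | nil => simp
  | cons x xs ih => simp [List.foldl_cons, ih, List.replicate_succ]

theorem left_same_right_up_left_down_spec_aux (made_finger : List Int) (current_len : Int) :
    left_same_right_up_left_down made_finger current_len
      = left_same_right_up_left_down_alt made_finger current_len := by
  by_cases h1 : current_len = 1
  · simp [left_same_right_up_left_down, left_same_right_up_left_down_alt, h1]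
  · by_cases h2 : current_len = 2
    · simp [left_same_right_up_left_down, left_same_right_up_left_down_alt, h2]
    · by_cases h3 : 3 ≤ current_len
      · have hm : PySem.Int.mod current_len 3 = current_len % 3 :=
          PySem.Int.mod_eq_emod_of_pos (by omega)
        have hr1 : 0 ≤ current_len % 3 := Int.emod_nonneg _ (by omega)
        have hr2 : current_len % 3 < 3 := Int.emod_lt_of_pos _ (by omega)
        rw [left_same_right_up_left_down]
        simp only [h1, h2, h3, if_true, if_false, if_neg h1, if_neg h2, if_pos h3]
        rw [foldl_append_const_replicate, PySem.List.length_pyRange_one]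
        unfold left_same_right_up_left_down_alt
        simp only [if_pos h3]
        -- remainder cases
        rcases (by omega : current_len % 3 = 0 ∨ current_len % 3 = 1 ∨ current_len % 3 = 2) with h0 | h0 | h0 <;>
          rw [left_same_right_up_left_down] <;>
          simp [hm, h0]
      · rw [left_same_right_up_left_down]
        simp only [if_neg h1, if_neg h2, if_neg h3]
        unfold left_same_right_up_left_down_alt
        simp [h1, h2, h3]

-- ===== VERDICT (by name: the statement is the Claim_ definition above) =====
theorem left_same_right_up_left_down_spec : Claim_equal_left_same_right_up_left_down := by
  intro mf n _
  exact left_same_right_up_left_down_spec_aux mf n
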